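-- pv_equiv track=rewrite | github.com/keeeeeey/baekjoon_algorithm | 시험/skt1.py | solution
-- ===== SOURCE A (Python) =====
-- def solution(p):
--     answer = [0] * len(p)
--     for i in range(len(p)):
--         min_idx = i
--
--         if p[i] != i + 1:
--             answer[i] += 1
--
--         for j in range(i + 1, len(p)):
--             if p[min_idx] > p[j]:
--                 min_idx = j
--
--         if p[min_idx] != min_idx + 1:
--             answer[min_idx] += 1
--         p[i], p[min_idx] = p[min_idx], p[i]
--     return answer
-- ===== SOURCE B (Python) =====
-- def solution(p):
--     # Equivalence is about the return value only: A sorts p in place, B leaves p untouched.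
--     # B: sort once, then replay the placements via a value -> current-positions index;
--     # no inner argmin scan.
--     n = len(p)
--     cur = list(p)
--     pos = {}
--     for idx in range(n):
--         pos.setdefault(cur[idx], []).append(idx)
--     s = sorted(cur)
--     ans = [0] * n
--     for i in range(n):
--         m = s[i]
--         lst = pos[m]
--         j = min(lst)
--         lst.remove(j)
--         ans[i] += cur[i] != i + 1
--         ans[j] += m != j + 1
--         if j != i:
--             v = cur[i]
--             cur[j] = v
--             lv = pos[v]
--             lv.remove(i)
--             lv.append(j)
--             cur[i] = m
--     return ans
-- ===== Notes on version B (the rewrite author's own statement) =====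
-- stated objective: faster
-- what changed: B drops A's per-step O(n) argmin scan: it sorts the list once, then replays the placements using a value-to-current-positions dictionary (min/remove/append on the value's bucket), updating the single displaced element's position at each step; B does not mutate its argument.
import Mathlib
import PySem

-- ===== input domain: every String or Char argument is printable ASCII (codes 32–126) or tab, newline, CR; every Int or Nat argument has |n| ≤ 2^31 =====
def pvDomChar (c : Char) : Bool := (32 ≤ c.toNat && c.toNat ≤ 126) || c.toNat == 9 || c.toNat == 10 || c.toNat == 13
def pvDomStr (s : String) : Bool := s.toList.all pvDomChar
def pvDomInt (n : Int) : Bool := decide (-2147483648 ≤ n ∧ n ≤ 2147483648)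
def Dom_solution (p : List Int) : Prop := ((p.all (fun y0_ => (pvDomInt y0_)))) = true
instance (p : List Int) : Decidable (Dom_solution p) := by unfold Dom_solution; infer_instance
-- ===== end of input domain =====

-- B replaces A's selection-sort simulation (per-step O(n) argmin scan) by sorting once and
-- replaying the placements through a value → current-positions dictionary; equal return
-- values (A sorts its argument in place, B does not — the claim is about the return value only).

-- ===== PORT A =====
-- one step of A's outer loop: argmin scan over j in range(i+1, n), two counter bumps, swap
def solutionStep (n : Nat) (st : List Int × List Int) (i : Nat) : List Int × List Int :=
  let p := st.1
  let answer := st.2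
  -- min_idx = i; for j in range(i+1, len(p)): if p[min_idx] > p[j]: min_idx = j
  let minIdx := (List.range' (i+1) (n - (i+1))).foldl
    (fun m j => if p.getD m 0 > p.getD j 0 then j else m) i
  -- if p[i] != i + 1: answer[i] += 1
  let answer := if p.getD i 0 ≠ (i : Int) + 1 then answer.set i (answer.getD i 0 + 1) else answer
  -- if p[min_idx] != min_idx + 1: answer[min_idx] += 1
  let answer := if p.getD minIdx 0 ≠ (minIdx : Int) + 1 then
      answer.set minIdx (answer.getD minIdx 0 + 1) else answer
  -- p[i], p[min_idx] = p[min_idx], p[i]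
  ((p.set i (p.getD minIdx 0)).set minIdx (p.getD i 0), answer)

def solution (p : List Int) : List Int :=
  let n := p.length
  ((List.range n).foldl (solutionStep n) (p, List.replicate n 0)).2

-- ===== PORT B =====
-- for idx in range(n): pos.setdefault(cur[idx], []).append(idx)
def buildPos (cur : List Int) : PySem.Dict Int (List Nat) :=
  (List.range cur.length).foldl
    (fun d idx => d.modify (cur.getD idx 0) [] (· ++ [idx])) PySem.Dict.empty

-- one step of B's loop: m = s[i]; lst = pos[m]; j = min(lst); lst.remove(j); two bumps;
-- if j != i: move the displaced front element from position i to position j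
def solutionAltStep (s : List Int)
    (st : List Int × PySem.Dict Int (List Nat) × List Int) (i : Nat) :
    List Int × PySem.Dict Int (List Nat) × List Int :=
  let cur := st.1
  let pos := st.2.1
  let ans := st.2.2
  let m := s.getD i 0
  let lst := (PySem.Dict.get? pos m).getD []          -- pos[m]; key present whenever this runs
  let j := (PySem.List.min? lst (fun x => x)).getD 0  -- min(lst); lst nonempty whenever this runs
  let pos := pos.insert m ((PySem.List.remove? lst j).getD lst)   -- lst.remove(j), in place
  let ans := ans.set i (ans.getD i 0 + if cur.getD i 0 ≠ (i : Int) + 1 then 1 else 0)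
  let ans := ans.set j (ans.getD j 0 + if m ≠ (j : Int) + 1 then 1 else 0)
  if j ≠ i then
    let v := cur.getD i 0
    let cur := cur.set j v
    let lv := (PySem.Dict.get? pos v).getD []         -- pos[v]; key present whenever this runs
    let pos := pos.insert v (((PySem.List.remove? lv i).getD lv) ++ [j])
    (cur.set i m, pos, ans)
  else (cur, pos, ans)

def solution_alt (p : List Int) : List Int :=
  let n := p.length
  let cur := p
  let pos := buildPos cur
  let s := PySem.List.sorted cur (fun x => x) false
  ((List.range n).foldl (solutionAltStep s) (cur, pos, List.replicate n 0)).2.2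

-- ===== PRECONDITION & SPEC =====
def Spec_solution (p : List Int) (out : List Int) : Prop := out = solution_alt p
instance (p : List Int) (out : List Int) : Decidable (Spec_solution p out) := by unfold Spec_solution; infer_instance

-- ===== CLAIM (what is proved, stated in full; the proofs are below) =====
def Claim_equal_solution : Prop := ∀ (p : List Int), Dom_solution p → Spec_solution p (solution p)

-- ===== LEMMAS AND PROOFS =====

-- setting a cell to its own value is the identity (out of range: both are no-ops)
theorem set_getD_self (l : List Int) (i : Nat) : l.set i (l.getD i 0) = l := by
  induction l generalizing i with
  | nil => simp
  | cons x xs ih =>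
    cases i with
    | zero => simp [List.getD]
    | succ k =>
      simp only [List.set, List.getD, List.getElem?_cons_succ]
      exact congrArg (x :: ·) (ih k)

-- A's conditional bump is B's unconditional set with an ite increment
theorem cond_bump (ans : List Int) (k : Nat) (c : Prop) [Decidable c] :
    (if c then ans.set k (ans.getD k 0 + 1) else ans)
      = ans.set k (ans.getD k 0 + if c then 1 else 0) := by
  by_cases h : c
  · simp [h]
  · rw [if_neg h, if_neg h, add_zero]
    exact (set_getD_self ans k).symm

-- characterisation of the leftmost minimum over positions [lo, b)
def LMin (f : Nat → Int) (lo b r : Nat) : Prop :=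
  lo ≤ r ∧ r < b ∧ (∀ k, lo ≤ k → k < b → f r ≤ f k) ∧ (∀ k, lo ≤ k → k < r → f r < f k)

theorem lmin_unique (f : Nat → Int) (lo b r₁ r₂ : Nat)
    (h₁ : LMin f lo b r₁) (h₂ : LMin f lo b r₂) : r₁ = r₂ := by
  obtain ⟨hlo₁, hb₁, hmin₁, hstr₁⟩ := h₁
  obtain ⟨hlo₂, hb₂, hmin₂, hstr₂⟩ := h₂
  rcases Nat.lt_trichotomy r₁ r₂ with h | h | h
  · exact absurd (hmin₁ r₂ hlo₂ hb₂) (not_le.mpr (hstr₂ r₁ hlo₁ h))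
  · exact h
  · exact absurd (hmin₂ r₁ hlo₁ hb₁) (not_le.mpr (hstr₁ r₂ hlo₂ h))

-- A's inner scan: starting from the leftmost-min of [lo, t+1), scanning t+1 … t+rem yields
-- the leftmost-min of [lo, t+1+rem)
theorem argmin_fold_inv (f : Nat → Int) (lo : Nat) : ∀ (rem t a : Nat), LMin f lo (t+1) a →
    LMin f lo (t+1+rem) ((List.range' (t+1) rem).foldl
      (fun m j => if f m > f j then j else m) a) := by
  intro rem
  induction rem with
  | zero => intro t a h; simpa using h
  | succ rem ih =>
    intro t a h
    rw [List.range'_succ, List.foldl_cons]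
    obtain ⟨hlo, hb, hmin, hstr⟩ := h
    have step : LMin f lo (t+2) (if f a > f (t+1) then t+1 else a) := by
      by_cases hc : f a > f (t+1)
      · rw [if_pos hc]
        refine ⟨by omega, by omega, ?_, ?_⟩
        · intro k hk1 hk2
          rcases Nat.lt_or_ge k (t+1) with hk' | hk'
          · exact le_trans (le_of_lt hc) (hmin k hk1 hk')
          · have : k = t + 1 := by omega
            simp [this]
        · intro k hk1 hk2
          exact lt_of_lt_of_le hc (hmin k hk1 hk2)
      · rw [if_neg hc]
        refine ⟨hlo, by omega, ?_, hstr⟩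
        intro k hk1 hk2
        rcases Nat.lt_or_ge k (t+1) with hk' | hk'
        · exact hmin k hk1 hk'
        · have : k = t + 1 := by omega
          rw [this]
          exact le_of_not_gt hc
    have := ih (t+1) _ step
    have harr : t + 1 + 1 + rem = t + 1 + (rem + 1) := by omega
    rwa [harr] at this

-- the position dictionary is exact: pos[v] holds each unplaced position of v exactly once
def PosOk (pos : PySem.Dict Int (List Nat)) (cur : List Int) (i : Nat) : Prop :=
  ∀ (v : Int) (k : Nat), (pos.getD v []).count k
    = if i ≤ k ∧ k < cur.length ∧ cur.getD k 0 = v then 1 else 0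

theorem posok_mem {pos : PySem.Dict Int (List Nat)} {cur : List Int} {i : Nat}
    (h : PosOk pos cur i) (v : Int) (k : Nat) :
    k ∈ pos.getD v [] ↔ (i ≤ k ∧ k < cur.length ∧ cur.getD k 0 = v) := by
  constructor
  · intro hk
    have hc := h v k
    by_contra hnot
    rw [if_neg hnot] at hc
    have := List.count_pos_iff.mpr hk
    omega
  · intro hk
    have hc := h v k
    rw [if_pos hk] at hc
    exact List.count_pos_iff.mp (by omega)

-- the step lemma: under the invariant, one A step and one B step produce the same array and
-- the same counters, and the invariant survives
-- membership in a suffix, phrased through getD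
theorem mem_drop_iff_getD (l : List Int) (i : Nat) (x : Int) :
    x ∈ l.drop i ↔ ∃ k, i ≤ k ∧ k < l.length ∧ l.getD k 0 = x := by
  rw [List.mem_iff_getElem]
  constructor
  · rintro ⟨t, ht, hx⟩
    have htl : i + t < l.length := by
      simp only [List.length_drop] at ht; omega
    refine ⟨i + t, Nat.le_add_right _ _, htl, ?_⟩
    rw [List.getD_eq_getElem l 0 htl, ← List.getElem_drop]
    exact hx
  · rintro ⟨k, hik, hkn, hx⟩
    refine ⟨k - i, by simp only [List.length_drop]; omega, ?_⟩
    rw [List.getElem_drop, ← List.getD_eq_getElem l 0 (by omega : i + (k - i) < l.length),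
      show i + (k - i) = k from by omega]
    exact hx

-- getD after set, in range
theorem getD_set_eq_ite (l : List Int) (a : Nat) (x : Int) (k : Nat) (ha : a < l.length) :
    (l.set a x).getD k 0 = if k = a then x else l.getD k 0 := by
  by_cases hk : k = a
  · subst hk; simp [List.getD, ha]
  · simp [List.getD, hk, Ne.symm hk]

-- shifting the lower bound past a position known not to be k
theorem ite_shift (k i len : Nat) (P : Prop) [Decidable P] (hk : k ≠ i) :
    (if i ≤ k ∧ k < len ∧ P then (1 : Nat) else 0)
      = (if i + 1 ≤ k ∧ k < len ∧ P then (1 : Nat) else 0) := by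
  by_cases hp : P
  · by_cases hb : k < len
    · by_cases hik : i ≤ k
      · rw [if_pos ⟨hik, hb, hp⟩, if_pos ⟨by omega, hb, hp⟩]
      · rw [if_neg (fun h => hik h.1), if_neg (fun h => hik (by omega))]
    · rw [if_neg (fun h => hb h.2.1), if_neg (fun h => hb h.2.1)]
  · rw [if_neg (fun h => hp h.2.2), if_neg (fun h => hp h.2.2)]

theorem step_eq (n : Nat) (s cur ans : List Int) (pos : PySem.Dict Int (List Nat)) (i : Nat)
    (hn : cur.length = n) (hin : i < n)
    (hmono : ∀ t, i ≤ t → t < n → s.getD i 0 ≤ s.getD t 0)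
    (hperm : (cur.drop i).Perm (s.drop i)) (hsn : s.length = n)
    (hpos : PosOk pos cur i) :
    solutionStep n (cur, ans) i
        = ((solutionAltStep s (cur, pos, ans) i).1, (solutionAltStep s (cur, pos, ans) i).2.2)
      ∧ (solutionAltStep s (cur, pos, ans) i).1.length = n
      ∧ ((solutionAltStep s (cur, pos, ans) i).1.drop (i+1)).Perm (s.drop (i+1))
      ∧ PosOk (solutionAltStep s (cur, pos, ans) i).2.1
          (solutionAltStep s (cur, pos, ans) i).1 (i+1) := by
  have hci : i < cur.length := by omega
  have hsi : i < s.length := by omega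
  have hdrops : s.drop i = s.getD i 0 :: s.drop (i+1) := by
    rw [List.drop_eq_getElem_cons hsi, List.getD_eq_getElem s 0 hsi]
  have hdropc : cur.drop i = cur.getD i 0 :: cur.drop (i+1) := by
    rw [List.drop_eq_getElem_cons hci, List.getD_eq_getElem cur 0 hci]
  have hlst : (PySem.Dict.get? pos (s.getD i 0)).getD [] = pos.getD (s.getD i 0) [] :=
    (PySem.Dict.getD_eq_get?_getD pos (s.getD i 0) []).symm
  -- the minimum value of the unplaced suffix is s[i]
  have hminval : ∀ k, i ≤ k → k < n → s.getD i 0 ≤ cur.getD k 0 := by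
    intro k hik hkn
    have hmem : cur.getD k 0 ∈ cur.drop i :=
      (mem_drop_iff_getD cur i _).mpr ⟨k, hik, by omega, rfl⟩
    obtain ⟨t, hit, htn, hx⟩ := (mem_drop_iff_getD s i _).mp (hperm.mem_iff.mp hmem)
    exact hx ▸ hmono t hit (by omega)
  -- s[i] occurs in the suffix, so pos[s[i]] is nonempty
  have hmmem : s.getD i 0 ∈ cur.drop i := by
    refine hperm.mem_iff.mpr ?_
    rw [hdrops]; exact List.mem_cons_self
  obtain ⟨k0, hk0i, hk0n, hk0v⟩ := (mem_drop_iff_getD cur i _).mp hmmem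
  have hk0lst : k0 ∈ pos.getD (s.getD i 0) [] :=
    (posok_mem hpos _ k0).mpr ⟨hk0i, hk0n, hk0v⟩
  obtain ⟨j0, hj0⟩ : ∃ j0, PySem.List.min? (pos.getD (s.getD i 0) []) (fun x => x) = some j0 := by
    cases h : PySem.List.min? (pos.getD (s.getD i 0) []) (fun x => x) with
    | none =>
      rw [PySem.List.min?_eq_none_iff] at h
      rw [h] at hk0lst
      cases hk0lst
    | some j0 => exact ⟨j0, rfl⟩
  have hjlst : j0 ∈ pos.getD (s.getD i 0) [] := PySem.List.min?_mem hj0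
  have hjmin : ∀ y ∈ pos.getD (s.getD i 0) [], j0 ≤ y :=
    fun y hy => PySem.List.min?_isMin hj0 y hy
  obtain ⟨hij, hjn, hcj⟩ := (posok_mem hpos _ j0).mp hjlst
  -- positions left of j0 in the suffix do not hold s[i]
  have hleft : ∀ k, i ≤ k → k < j0 → cur.getD k 0 ≠ s.getD i 0 := by
    intro k hik hkj heq
    have : k ∈ pos.getD (s.getD i 0) [] :=
      (posok_mem hpos _ k).mpr ⟨hik, by omega, heq⟩
    exact absurd (hjmin k this) (by omega)
  -- A's argmin scan lands exactly on j0
  have hLj : LMin (fun k => cur.getD k 0) i n j0 := by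
    refine ⟨hij, by omega, ?_, ?_⟩
    · intro k h1 h2
      simp only [hcj]
      exact hminval k h1 h2
    · intro k h1 h2
      simp only [hcj]
      exact lt_of_le_of_ne (hminval k h1 (by omega)) (Ne.symm (hleft k h1 h2))
  have hbase : LMin (fun k => cur.getD k 0) i (i+1) i := by
    refine ⟨le_refl i, by omega, ?_, ?_⟩
    · intro k h1 h2
      have : k = i := by omega
      simp [this]
    · intro k h1 h2
      omega
  have hminIdx : (List.range' (i+1) (n-(i+1))).foldl
      (fun m' j => if cur.getD m' 0 > cur.getD j 0 then j else m') i = j0 := by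
    have hfold := argmin_fold_inv (fun k => cur.getD k 0) i (n - (i+1)) i i hbase
    rw [show i + 1 + (n - (i+1)) = n from by omega] at hfold
    exact lmin_unique (fun k => cur.getD k 0) i n _ j0 hfold hLj
  have hremove : PySem.List.remove? (pos.getD (s.getD i 0) []) j0
      = some ((pos.getD (s.getD i 0) []).erase j0) :=
    PySem.List.remove?_eq_some_erase _ j0 hjlst
  simp only [solutionStep, solutionAltStep]
  rw [hminIdx, hlst, hj0]
  simp only [Option.getD_some]
  rw [hremove]
  simp only [Option.getD_some]
  rcases eq_or_ne j0 i with hji | hji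
  · -- the minimum already sits at the front: no move
    subst hji
    simp only [ne_eq, not_true_eq_false, if_false]
    refine ⟨?_, hn, ?_, ?_⟩
    · -- same array (unchanged) and same counters
      rw [← hcj, cond_bump, cond_bump]
      refine Prod.ext ?_ rfl
      rw [List.set_set]
      exact set_getD_self cur j0
    · have h := hperm
      rw [hdropc, hdrops, hcj] at h
      exact h.cons_inv
    · intro w k
      rw [PySem.Dict.getD_insert]
      by_cases hw : w = s.getD j0 0
      · rw [if_pos hw, hw, List.count_erase, hpos]
        simp only [beq_iff_eq]
        by_cases hkj : k = j0
        · rw [if_pos (show j0 ≤ k ∧ k < cur.length ∧ cur.getD k 0 = s.getD j0 0 from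
              ⟨by omega, by omega, by rw [hkj]; exact hcj⟩),
            if_pos (show j0 = k from hkj.symm),
            if_neg (show ¬(j0 + 1 ≤ k ∧ k < cur.length ∧ cur.getD k 0 = s.getD j0 0) from
              fun h => absurd h.1 (by omega))]
        · rw [if_neg (show ¬ j0 = k from fun h => hkj h.symm), Nat.sub_zero]
          exact ite_shift k j0 cur.length _ hkj
      · rw [if_neg hw, hpos w k]
        by_cases hkj : k = j0
        · rw [if_neg (show ¬(j0 ≤ k ∧ k < cur.length ∧ cur.getD k 0 = w) from
              fun h => hw (by rw [← h.2.2, hkj]; exact hcj)),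
            if_neg (show ¬(j0 + 1 ≤ k ∧ k < cur.length ∧ cur.getD k 0 = w) from
              fun h => absurd h.1 (by omega))]
        · exact ite_shift k j0 cur.length _ hkj
  · -- the minimum sits strictly right of the front: move the front element to j0
    simp only [ne_eq, hji, not_false_iff, if_true]
    have hilt : i < j0 := lt_of_le_of_ne hij (Ne.symm hji)
    have hvm : cur.getD i 0 ≠ s.getD i 0 := by
      intro h
      have : i ∈ pos.getD (s.getD i 0) [] := (posok_mem hpos _ i).mpr ⟨le_refl i, hci, h⟩
      exact absurd (hjmin i this) (by omega)
    have hlv : ((pos.insert (s.getD i 0) ((pos.getD (s.getD i 0) []).erase j0)).get?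
        (cur.getD i 0)).getD [] = pos.getD (cur.getD i 0) [] := by
      rw [← PySem.Dict.getD_eq_get?_getD, PySem.Dict.getD_insert, if_neg hvm]
    rw [hlv]
    have hilv : i ∈ pos.getD (cur.getD i 0) [] :=
      (posok_mem hpos _ i).mpr ⟨le_refl i, hci, rfl⟩
    rw [PySem.List.remove?_eq_some_erase _ i hilv]
    simp only [Option.getD_some]
    have hcur' : ∀ k, ((cur.set j0 (cur.getD i 0)).set i (s.getD i 0)).getD k 0
        = if k = i then s.getD i 0 else if k = j0 then cur.getD i 0 else cur.getD k 0 := by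
      intro k
      rw [getD_set_eq_ite _ i _ k (by rw [List.length_set]; omega),
        getD_set_eq_ite _ j0 _ k (by omega)]
    refine ⟨?_, by simp [hn], ?_, ?_⟩
    · -- same array (the swap) and same counters
      rw [hcj, cond_bump, cond_bump]
      exact Prod.ext (List.set_comm _ _ (fun h => hji h.symm)) rfl
    · -- the suffix stays a rearrangement of the sorted tail
      have hdropset : ((cur.set j0 (cur.getD i 0)).set i (s.getD i 0)).drop (i+1)
          = (cur.drop (i+1)).set (j0 - (i+1)) (cur.getD i 0) := by
        rw [List.drop_set, if_pos (by omega : i < i + 1), List.drop_set,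
          if_neg (by omega : ¬ j0 < i + 1)]
      rw [hdropset]
      have htL : j0 - (i+1) < (cur.drop (i+1)).length := by
        rw [List.length_drop]; omega
      have hLdec : cur.drop (i+1) = (cur.drop (i+1)).take (j0 - (i+1))
          ++ s.getD i 0 :: (cur.drop (i+1)).drop (j0 - (i+1) + 1) := by
        conv_lhs => rw [← List.take_append_drop (j0 - (i+1)) (cur.drop (i+1))]
        congr 1
        rw [List.drop_eq_getElem_cons htL]
        congr 1
        rw [List.getElem_drop, ← List.getD_eq_getElem cur 0 (by omega : i + 1 + (j0 - (i+1)) < cur.length),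
          show i + 1 + (j0 - (i+1)) = j0 from by omega, hcj]
      have hsetdec : (cur.drop (i+1)).set (j0 - (i+1)) (cur.getD i 0)
          = (cur.drop (i+1)).take (j0 - (i+1))
            ++ cur.getD i 0 :: (cur.drop (i+1)).drop (j0 - (i+1) + 1) := by
        rw [List.set_eq_take_append_cons_drop, if_pos htL]
      have hp0 : (cur.getD i 0 :: cur.drop (i+1)).Perm (s.getD i 0 :: s.drop (i+1)) := by
        rw [← hdropc, ← hdrops]; exact hperm
      refine List.perm_iff_count.mpr ?_
      intro a
      have h0 := List.perm_iff_count.mp hp0 a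
      rw [hLdec] at h0
      rw [hsetdec]
      simp only [List.count_cons, List.count_append] at h0 ⊢
      split_ifs at h0 ⊢ <;> omega
    · -- the position dictionary stays exact
      intro w k
      rw [PySem.Dict.getD_insert, PySem.Dict.getD_insert]
      have hlen' : ((cur.set j0 (cur.getD i 0)).set i (s.getD i 0)).length = cur.length := by
        simp
      rw [hlen', hcur' k]
      by_cases hk : k = i
      · rw [if_pos hk,
          if_neg (show ¬(i + 1 ≤ k ∧ k < cur.length ∧ s.getD i 0 = w) from
            fun h => absurd h.1 (by omega))]
        by_cases hw1 : w = cur.getD i 0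
        · rw [if_pos hw1, List.count_append, List.count_singleton, List.count_erase, hpos]
          simp only [beq_iff_eq]
          rw [if_pos (show i ≤ k ∧ k < cur.length ∧ cur.getD k 0 = cur.getD i 0 from
              ⟨by omega, by omega, by rw [hk]⟩),
            if_pos (show i = k from hk.symm),
            if_neg (show ¬ j0 = k from fun h => hji (by omega))]
        · rw [if_neg hw1]
          by_cases hw2 : w = s.getD i 0
          · rw [if_pos hw2, List.count_erase, hpos]
            simp only [beq_iff_eq]
            rw [if_neg (show ¬(i ≤ k ∧ k < cur.length ∧ cur.getD k 0 = s.getD i 0) from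
                fun h => hvm (hk ▸ h.2.2)),
              if_neg (show ¬ j0 = k from fun h => hji (by omega))]
          · rw [if_neg hw2, hpos w k,
              if_neg (show ¬(i ≤ k ∧ k < cur.length ∧ cur.getD k 0 = w) from
                fun h => hw1 (by rw [← h.2.2, hk]))]
      · by_cases hk2 : k = j0
        · rw [if_neg hk, if_pos hk2]
          by_cases hw1 : w = cur.getD i 0
          · rw [if_pos hw1, hw1, List.count_append, List.count_singleton, List.count_erase, hpos]
            simp only [beq_iff_eq]
            rw [if_neg (show ¬(i ≤ k ∧ k < cur.length ∧ cur.getD k 0 = cur.getD i 0) from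
                fun h => hvm (by rw [← h.2.2, hk2]; exact hcj)),
              if_neg (show ¬ i = k from fun h => hk h.symm),
              if_pos (show j0 = k from hk2.symm),
              if_pos (show i + 1 ≤ k ∧ k < cur.length ∧ True from
                ⟨by omega, by omega, trivial⟩)]
          · rw [if_neg hw1,
              if_neg (show ¬(i + 1 ≤ k ∧ k < cur.length ∧ cur.getD i 0 = w) from
                fun h => hw1 h.2.2.symm)]
            by_cases hw2 : w = s.getD i 0
            · rw [if_pos hw2, List.count_erase, hpos]
              simp only [beq_iff_eq]
              rw [if_pos (show i ≤ k ∧ k < cur.length ∧ cur.getD k 0 = s.getD i 0 from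
                  ⟨by omega, by omega, by rw [hk2]; exact hcj⟩),
                if_pos (show j0 = k from hk2.symm)]
            · rw [if_neg hw2, hpos w k,
                if_neg (show ¬(i ≤ k ∧ k < cur.length ∧ cur.getD k 0 = w) from
                  fun h => hw2 (by rw [← h.2.2, hk2]; exact hcj))]
        · rw [if_neg hk, if_neg hk2]
          by_cases hw1 : w = cur.getD i 0
          · rw [if_pos hw1, hw1, List.count_append, List.count_singleton, List.count_erase, hpos]
            simp only [beq_iff_eq]
            rw [if_neg (show ¬ i = k from fun h => hk h.symm),
              if_neg (show ¬ j0 = k from fun h => hk2 h.symm), Nat.sub_zero, Nat.add_zero]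
            exact ite_shift k i cur.length _ hk
          · rw [if_neg hw1]
            by_cases hw2 : w = s.getD i 0
            · rw [if_pos hw2, hw2, List.count_erase, hpos]
              simp only [beq_iff_eq]
              rw [if_neg (show ¬ j0 = k from fun h => hk2 h.symm), Nat.sub_zero]
              exact ite_shift k i cur.length _ hk
            · rw [if_neg hw2, hpos w k]
              exact ite_shift k i cur.length _ hk

-- the main loop: A's state and B's array/counter state coincide step by step
theorem loop_eq (n : Nat) (s : List Int)
    (hmono : ∀ i t, i ≤ t → t < n → s.getD i 0 ≤ s.getD t 0) (hsn : s.length = n) :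
    ∀ (rem i : Nat) (cur pos ans), i + rem = n → cur.length = n →
    ((cur.drop i).Perm (s.drop i)) → PosOk pos cur i →
    ((List.range' i rem).foldl (solutionStep n) (cur, ans)).2
      = ((List.range' i rem).foldl (solutionAltStep s) (cur, pos, ans)).2.2 := by
  intro rem
  induction rem with
  | zero => intro i cur pos ans _ _ _ _; simp
  | succ rem ih =>
    intro i cur pos ans hi hlen hperm hpos
    have hin : i < n := by omega
    obtain ⟨heq, hlen', hperm', hpos'⟩ :=
      step_eq n s cur ans pos i hlen hin (fun t => hmono i t) hperm hsn hpos
    rw [List.range'_succ, List.foldl_cons, List.foldl_cons, heq]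
    exact ih (i+1) _ _ _ (by omega) hlen' hperm' hpos'

-- the initial dictionary satisfies the invariant
theorem buildPos_ok (p : List Int) : PosOk (buildPos p) p 0 := by
  intro v k
  have hfold : buildPos p
      = ((List.range p.length).map (fun idx => (p.getD idx 0, idx))).foldl
          (fun d q => d.modify q.1 [] (· ++ [q.2])) PySem.Dict.empty := by
    unfold buildPos
    rw [List.foldl_map]
  have hget : (buildPos p).getD v []
      = (List.range p.length).filter (fun k => p.getD k 0 == v) := by
    rw [hfold, PySem.Dict.getD_foldl_modify_append]
    simp [List.filter_map, Function.comp_def]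
  rw [hget]
  have hnd : ((List.range p.length).filter (fun k => p.getD k 0 == v)).Nodup :=
    (List.nodup_range).filter _
  rw [List.Nodup.count hnd]
  by_cases hk : 0 ≤ k ∧ k < p.length ∧ p.getD k 0 = v
  · have hm : k ∈ (List.range p.length).filter (fun k => p.getD k 0 == v) :=
      List.mem_filter.mpr ⟨List.mem_range.mpr hk.2.1, by simpa [List.getD] using hk.2.2⟩
    rw [if_pos hm, if_pos hk]
  · have hm : k ∉ (List.range p.length).filter (fun k => p.getD k 0 == v) := by
      intro hmem
      obtain ⟨h1, h2⟩ := List.mem_filter.mp hmem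
      exact hk ⟨Nat.zero_le k, List.mem_range.mp h1, by simpa using h2⟩
    rw [if_neg hm, if_neg hk]

theorem solution_spec : Claim_equal_solution := by
  intro p _
  have hsn : (PySem.List.sorted p (fun x => x) false).length = p.length :=
    PySem.List.length_sorted p (fun x => x) false
  have hmono : ∀ i t, i ≤ t → t < p.length →
      (PySem.List.sorted p (fun x => x) false).getD i 0
        ≤ (PySem.List.sorted p (fun x => x) false).getD t 0 := by
    intro i t hit ht
    have ht' : t < (PySem.List.sorted p (fun x => x) false).length := by omega
    rw [List.getD_eq_getElem _ 0 (by omega), List.getD_eq_getElem _ 0 ht']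
    exact PySem.List.sorted_id_getElem_mono p hit ht'
  have hperm : (p.drop 0).Perm ((PySem.List.sorted p (fun x => x) false).drop 0) := by
    simpa using (PySem.List.sorted_perm p (fun x => x) false).symm
  have h := loop_eq p.length (PySem.List.sorted p (fun x => x) false) hmono hsn
    p.length 0 p (buildPos p) (List.replicate p.length 0) (by omega) rfl hperm (buildPos_ok p)
  simpa [Spec_solution, solution, solution_alt, List.range_eq_range'] using h
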